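-- pv_equiv track=rewrite | github.com/svercillo/LeetcodeAlgorithms | hard/best-time-to-buy-and-sell-stock-iii.py | get_profit_prefix
-- ===== SOURCE A (Python) =====
-- def get_profit_prefix(sunruns):
--     if not len(sunruns):
--         return []
--     prefix = [None] * len(sunruns)
--     prefix[0] = sunruns[0][1] - sunruns[0][0]
--
--     localmin = sunruns[0][0]
--     localmax = sunruns[0][1]
--     for index, (valley, peak) in enumerate(sunruns[1:]):
--         i = index + 1
--
--         if valley < localmin:
--             localmin = valley
--             localmax = peak
--
--         elif peak > localmax:
--             localmax = peak
--
--
--         prefix[i] = max(localmax - localmin, prefix[i-1])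
--
--     return prefix
-- ===== SOURCE B (Python) =====
-- def _scan(f, xs):
--     out = []
--     for x in xs:
--         out.append(x if not out else f(out[-1], x))
--     return out
--
-- def get_profit_prefix(sunruns):
--     valleys = [v for v, _ in sunruns]
--     peaks = [p for _, p in sunruns]
--     mins = _scan(min, valleys)
--     cands = [p - m for p, m in zip(peaks, mins)]
--     return _scan(max, cands)
-- ===== Notes on version B (the rewrite author's own statement) =====
-- stated objective: alternative
-- what changed: Replaces A's single fused loop with mutable localmin/localmax state and if/elif reset branches by three staged passes over separate arrays: a prefix-min scan of the valleys, a map producing per-day candidate profits peak - prefix_min, and a prefix-max scan of the candidates.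
import Mathlib
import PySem

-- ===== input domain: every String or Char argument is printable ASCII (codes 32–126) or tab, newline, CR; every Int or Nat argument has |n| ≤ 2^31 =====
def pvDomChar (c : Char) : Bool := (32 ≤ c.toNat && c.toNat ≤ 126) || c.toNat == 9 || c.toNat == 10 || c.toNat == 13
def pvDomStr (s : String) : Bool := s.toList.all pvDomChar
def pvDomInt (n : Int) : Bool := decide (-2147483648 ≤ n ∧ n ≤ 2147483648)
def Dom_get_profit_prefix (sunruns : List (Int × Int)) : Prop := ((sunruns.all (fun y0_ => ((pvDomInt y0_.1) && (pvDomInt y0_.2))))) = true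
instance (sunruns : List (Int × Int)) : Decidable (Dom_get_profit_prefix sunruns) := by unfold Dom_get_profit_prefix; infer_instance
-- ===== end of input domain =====

-- B replaces A's single fused loop with localmin/localmax state and if/elif reset branches
-- by three staged passes (prefix-min scan, candidate map, prefix-max scan); objective: alternative.

-- ===== PORT A =====
-- the loop body: update (localmin, localmax) by the if/elif, then append
-- max(localmax - localmin, prefix[i-1]) (prefix[i-1] = last appended entry)
def stepA (st : Int × Int × List Int) (vp : Int × Int) : Int × Int × List Int :=
  let s2 : Int × Int :=
    if vp.1 < st.1 then (vp.1, vp.2)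
    else if vp.2 > st.2.1 then (st.1, vp.2)
    else (st.1, st.2.1)
  (s2.1, s2.2, st.2.2 ++ [max (s2.2 - s2.1) (st.2.2.getLastD 0)])

def get_profit_prefix (sunruns : List (Int × Int)) : List Int :=
  match sunruns with
  | [] => []
  | (v0, p0) :: rest => (rest.foldl stepA (v0, p0, [p0 - v0])).2.2

-- ===== PORT B =====
-- _scan's loop after the first element: accumulator m = out[-1]
def scanAcc (f : Int → Int → Int) (m : Int) : List Int → List Int
  | [] => []
  | y :: t => let m' := f m y; m' :: scanAcc f m' t

-- _scan: first element copied, then the accumulating loop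
def scan1 (f : Int → Int → Int) : List Int → List Int
  | [] => []
  | x :: t => x :: scanAcc f x t

def get_profit_prefix_alt (sunruns : List (Int × Int)) : List Int :=
  let valleys := sunruns.map Prod.fst
  let peaks := sunruns.map Prod.snd
  let mins := scan1 min valleys
  let cands := (peaks.zip mins).map (fun q => q.1 - q.2)
  scan1 max cands

-- ===== PRECONDITION & SPEC =====
def Spec_get_profit_prefix (sunruns : List (Int × Int)) (out : List Int) : Prop := out = get_profit_prefix_alt sunruns
instance (sunruns : List (Int × Int)) (out : List Int) : Decidable (Spec_get_profit_prefix sunruns out) := by unfold Spec_get_profit_prefix; infer_instance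

-- ===== CLAIM (what is proved, stated in full; the proofs are below) =====
def Claim_equal_get_profit_prefix : Prop := ∀ (sunruns : List (Int × Int)), Dom_get_profit_prefix sunruns → Spec_get_profit_prefix sunruns (get_profit_prefix sunruns)

-- ===== LEMMAS AND PROOFS =====

-- common reference scan: running min of valleys and running best profit
def goSpec (minv best : Int) : List (Int × Int) → List Int
  | [] => []
  | (v, p) :: t =>
    let m := min minv v
    let b := max best (p - m)
    b :: goSpec m b t

-- A's fold produces the reference scan, under the invariant lmax - lmin ≤ best,
-- where best is the last appended entry.
theorem foldA_eq_goSpec (rest : List (Int × Int)) :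
    ∀ (lmin lmax best : Int) (pre : List Int), lmax - lmin ≤ best →
    (List.foldl stepA (lmin, lmax, pre ++ [best]) rest).2.2 =
    (pre ++ [best]) ++ goSpec lmin best rest := by
  induction rest with
  | nil => intro _ _ _ _ _; simp [goSpec]
  | cons vp t ih =>
    intro lmin lmax best pre hinv
    rcases vp with ⟨v, p⟩
    simp only [List.foldl_cons, stepA, List.getLastD_concat, goSpec]
    by_cases h1 : v < lmin
    · simp only [if_pos h1]
      have hm : min lmin v = v := by omega
      have hb : max (p - v) best = max best (p - v) := by omega
      rw [hb]
      have := ih v p (max best (p - v)) (pre ++ [best]) (by omega)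
      rw [this, hm]
      simp
    · simp only [if_neg h1]
      have hm : min lmin v = lmin := by omega
      by_cases h2 : p > lmax
      · simp only [if_pos h2]
        have hb : max (p - lmin) best = max best (p - lmin) := by omega
        rw [hb]
        have := ih lmin p (max best (p - lmin)) (pre ++ [best]) (by omega)
        rw [this, hm]
        simp
      · simp only [if_neg h2]
        have hA : max (lmax - lmin) best = best := by omega
        have hb : max best (p - lmin) = best := by omega
        rw [hA]
        have := ih lmin lmax best (pre ++ [best]) hinv
        rw [this, hm, hb]
        simp

-- B's staged scans fuse into the reference scan
theorem scans_eq_goSpec (rest : List (Int × Int)) :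
    ∀ (minv best : Int),
    scanAcc max best
      (((rest.map Prod.snd).zip (scanAcc min minv (rest.map Prod.fst))).map
        (fun q => q.1 - q.2)) = goSpec minv best rest := by
  induction rest with
  | nil => intro _ _; rfl
  | cons vp t ih =>
    intro minv best
    rcases vp with ⟨v, p⟩
    simp only [List.map_cons, scanAcc, List.zip_cons_cons, goSpec]
    exact congrArg _ (ih (min minv v) (max best (p - min minv v)))

-- ===== VERDICT (by name: the statement is the Claim_ definition above) =====
theorem get_profit_prefix_spec : Claim_equal_get_profit_prefix := by
  intro sunruns _
  unfold Spec_get_profit_prefix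
  rcases sunruns with _ | ⟨⟨v0, p0⟩, rest⟩
  · rfl
  · have hA := foldA_eq_goSpec rest v0 p0 (p0 - v0) [] (by omega)
    simp only [List.nil_append] at hA
    simp only [get_profit_prefix, get_profit_prefix_alt, List.map_cons, scan1,
      List.zip_cons_cons, List.map_cons]
    rw [hA, scans_eq_goSpec rest v0 (p0 - v0)]
    rfl
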